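-- pv_equiv track=rewrite | github.com/RoboSats/robo-identities | robohash/scripts/collect_parts.py | get_alphabetic_substring
-- ===== SOURCE A (Python) =====
-- def get_alphabetic_substring(string:str)-> str:
--     for i in range(len(string)-1, -1, -1):
--         if string[i].isdigit():
--             result = string[i+1:]
--             if result == "":
--                 return "BACKGROUND"
--             return result
--     return ""
-- ===== SOURCE B (Python) =====
-- def get_alphabetic_substring(string: str) -> str:
--     indices = [i for i, c in enumerate(string) if c.isdigit()]
--     if not indices:
--         return ""
--     result = string[indices[-1] + 1:]
--     return result if result else "BACKGROUND"
-- ===== Notes on version B (the rewrite author's own statement) =====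
-- stated objective: simpler
-- what changed: Replaces the early-returning reverse index scan with a forward pass collecting digit indices, then taking the last one and classifying the slice ('' if none, 'BACKGROUND' if the slice is empty).
import Mathlib
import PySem

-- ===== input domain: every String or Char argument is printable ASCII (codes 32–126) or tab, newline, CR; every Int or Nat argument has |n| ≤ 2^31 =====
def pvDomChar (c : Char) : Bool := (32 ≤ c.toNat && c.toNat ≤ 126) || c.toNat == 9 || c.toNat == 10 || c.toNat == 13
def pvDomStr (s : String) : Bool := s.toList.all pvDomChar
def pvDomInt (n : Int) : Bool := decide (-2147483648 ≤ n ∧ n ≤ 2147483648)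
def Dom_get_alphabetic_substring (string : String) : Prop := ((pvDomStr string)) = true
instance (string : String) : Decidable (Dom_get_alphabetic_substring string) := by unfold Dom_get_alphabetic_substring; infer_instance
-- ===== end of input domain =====

-- B replaces A's early-returning reverse scan by a forward collect-digit-indices pass
-- plus a single slice-and-classify step; objective: simpler decomposition, same cost.

-- ===== PORT A =====
-- 'for i in range(len(string)-1, -1, -1)' with early return, as recursion over the countdown index list
def pvAGo (cs : List Char) : List Int → String
  | [] => ""
  | i :: rest =>
    if PySem.Chars.isdigit (PySem.List.pyGetD cs i ' ') then
      let result := PySem.List.slice cs (some (i + 1)) none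
      if result = [] then "BACKGROUND" else String.ofList result
    else pvAGo cs rest

def get_alphabetic_substring (string : String) : String :=
  pvAGo string.toList (PySem.List.pyRange ((string.toList.length : Int) - 1) (-1) (-1))

-- ===== PORT B =====
-- indices = [i for i, c in enumerate(string) if c.isdigit()]
def pvDigitIdxs (cs : List Char) : List Int :=
  (PySem.List.enumerate cs 0).filterMap
    (fun p => if PySem.Chars.isdigit p.2 then some p.1 else none)

def get_alphabetic_substring_alt (string : String) : String :=
  let cs := string.toList
  let indices := pvDigitIdxs cs
  if indices = [] then ""
  else
    let result := PySem.List.slice cs (some (PySem.List.pyGetD indices (-1) 0 + 1)) none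
    if result = [] then "BACKGROUND" else String.ofList result

-- ===== PRECONDITION & SPEC =====
def Spec_get_alphabetic_substring (string : String) (out : String) : Prop := out = get_alphabetic_substring_alt string
instance (string : String) (out : String) : Decidable (Spec_get_alphabetic_substring string out) := by unfold Spec_get_alphabetic_substring; infer_instance

-- ===== CLAIM (what is proved, stated in full; the proofs are below) =====
def Claim_equal_get_alphabetic_substring : Prop := ∀ (string : String), Dom_get_alphabetic_substring string → Spec_get_alphabetic_substring string (get_alphabetic_substring string)

-- ===== LEMMAS AND PROOFS =====

-- index of the last digit among cs[0..k]: the common characterisation of both programs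
def pvLastDig (cs : List Char) : Nat → Option Nat
  | 0 => if PySem.Chars.isdigit (cs.getD 0 ' ') then some 0 else none
  | Nat.succ k => if PySem.Chars.isdigit (cs.getD (k+1) ' ') then some (k+1) else pvLastDig cs k

-- the shared '' / BACKGROUND / slice classification applied to that index
def pvPost (cs : List Char) : Option Nat → String
  | none => ""
  | some j => if cs.drop (j+1) = [] then "BACKGROUND" else String.ofList (cs.drop (j+1))

lemma pvAGo_range (cs : List Char) : ∀ (k : Nat), k < cs.length →
    pvAGo cs (PySem.List.pyRange (k : Int) (-1) (-1)) = pvPost cs (pvLastDig cs k) := by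
  intro k
  induction k with
  | zero =>
    intro hk
    rw [PySem.List.pyRange_neg_one_cons (by omega), PySem.List.pyRange_neg_one_eq_nil (by omega)]
    have hs : PySem.List.slice cs (some (1:Int)) none = cs.drop 1 := by
      have h1 : (1:Int) = ((1:Nat) : Int) := by norm_num
      rw [h1, PySem.List.slice_from_natCast]
    by_cases hd : PySem.Chars.isdigit (cs[0]?.getD ' ')
    · simp [pvAGo, pvLastDig, pvPost, hs, hd, PySem.List.pyGetD_zero, List.getD_eq_getElem?_getD]
    · simp [pvAGo, pvLastDig, pvPost, hd, PySem.List.pyGetD_zero, List.getD_eq_getElem?_getD]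
  | succ k ih =>
    intro hk
    rw [PySem.List.pyRange_neg_one_cons (by omega : (-1:Int) < ((k+1 : Nat) : Int))]
    have hcast : (((k+1 : Nat)) : Int) - 1 = (k : Int) := by push_cast; ring
    have hs : PySem.List.slice cs (some (((k+1 : Nat) : Int) + 1)) none = cs.drop (k+2) := by
      have h2 : (((k+1 : Nat)) : Int) + 1 = ((k+2 : Nat) : Int) := by push_cast; ring
      rw [h2, PySem.List.slice_from_natCast]
    simp only [pvAGo, PySem.List.pyGetD_natCast, hcast, hs]
    by_cases hd : PySem.Chars.isdigit (cs[k+1]?.getD ' ')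
    · simp [pvLastDig, pvPost, hd, List.getD_eq_getElem?_getD]
    · simp [pvLastDig, pvPost, hd, ih (by omega), List.getD_eq_getElem?_getD]

lemma pvEnum_append (xs ys : List Char) (s : Int) :
    PySem.List.enumerate (xs ++ ys) s
      = PySem.List.enumerate xs s ++ PySem.List.enumerate ys (s + xs.length) := by
  induction xs generalizing s with
  | nil => simp [PySem.List.enumerate_nil]
  | cons x xs ih =>
    simp [PySem.List.enumerate_cons, ih]
    ring_nf

lemma pvDigitIdxs_append (cs : List Char) (c : Char) :
    pvDigitIdxs (cs ++ [c])
      = pvDigitIdxs cs ++ (if PySem.Chars.isdigit c then [(cs.length : Int)] else []) := by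
  unfold pvDigitIdxs
  rw [pvEnum_append]
  simp [PySem.List.enumerate_cons, PySem.List.enumerate_nil]
  by_cases hd : PySem.Chars.isdigit c <;> simp [hd]

lemma pvLastDig_append (cs ys : List Char) : ∀ (k : Nat), k < cs.length →
    pvLastDig (cs ++ ys) k = pvLastDig cs k := by
  intro k
  induction k with
  | zero =>
    intro hk
    simp [pvLastDig, List.getD_eq_getElem?_getD, List.getElem?_append_left hk]
  | succ k ih =>
    intro hk
    simp only [pvLastDig, List.getD_eq_getElem?_getD, List.getElem?_append_left hk,
      ih (by omega)]

lemma pvIdxs_getLast (cs : List Char) (h : cs ≠ []) :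
    (pvDigitIdxs cs).getLast? = (pvLastDig cs (cs.length - 1)).map (fun j => (j : Int)) := by
  induction cs using List.reverseRecOn with
  | nil => exact absurd rfl h
  | append_singleton cs c ih =>
    rw [pvDigitIdxs_append]
    have hlen : (cs ++ [c]).length - 1 = cs.length := by simp
    have hg : (cs ++ [c]).getD cs.length ' ' = c := by
      simp [List.getD_eq_getElem?_getD]
    by_cases hd : PySem.Chars.isdigit c
    · have hld : pvLastDig (cs ++ [c]) cs.length = some cs.length := by
        rcases Nat.eq_zero_or_pos cs.length with h0 | h0
        · obtain rfl := List.eq_nil_of_length_eq_zero h0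
          simp [pvLastDig, hd]
        · obtain ⟨m, hm⟩ : ∃ m, cs.length = m + 1 := ⟨cs.length - 1, by omega⟩
          rw [hm]
          rw [hm] at hg
          simp [pvLastDig, hd, ← hm]
      simp [hd, hld]
    · rcases Nat.eq_zero_or_pos cs.length with h0 | h0
      · obtain rfl := List.eq_nil_of_length_eq_zero h0
        simp [pvLastDig, hd, pvDigitIdxs, PySem.List.enumerate_nil]
      · have hcs : cs ≠ [] := List.ne_nil_of_length_pos h0
        obtain ⟨m, hm⟩ : ∃ m, cs.length = m + 1 := ⟨cs.length - 1, by omega⟩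
        rw [hlen, hm]
        rw [hm] at hg
        simp only [pvLastDig, hg, hd]
        rw [pvLastDig_append cs [c] m (by omega)]
        have hm' : m = cs.length - 1 := by omega
        simp [ih hcs, hm']

lemma pvAlt_eq (cs : List Char) (h : cs ≠ []) :
    get_alphabetic_substring_alt (String.ofList cs) = pvPost cs (pvLastDig cs (cs.length - 1)) := by
  rcases heq : pvLastDig cs (cs.length - 1) with _ | j
  · have hnone : (pvDigitIdxs cs).getLast? = none := by rw [pvIdxs_getLast cs h, heq]; rfl
    have hnil : pvDigitIdxs cs = [] := List.getLast?_eq_none_iff.mp hnone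
    simp [get_alphabetic_substring_alt, String.toList_ofList, hnil, pvPost]
  · have hlast : (pvDigitIdxs cs).getLast? = some (j : Int) := by
      rw [pvIdxs_getLast cs h, heq]; rfl
    have hne : pvDigitIdxs cs ≠ [] := by
      intro hx; rw [hx] at hlast; simp at hlast
    have hget : PySem.List.pyGetD (pvDigitIdxs cs) (-1) 0 = (j : Int) := by
      rw [PySem.List.pyGetD_neg_one (pvDigitIdxs cs) 0 hne]
      exact List.getLast_of_mem_getLast? hlast
    have hs : PySem.List.slice cs (some ((j : Int) + 1)) none = cs.drop (j+1) := by
      have h2 : ((j : Int) + 1) = ((j+1 : Nat) : Int) := by push_cast; ring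
      rw [h2, PySem.List.slice_from_natCast]
    simp [get_alphabetic_substring_alt, String.toList_ofList, hne, hget, hs, pvPost]

-- ===== VERDICT (by name: the statement is the Claim_ definition above) =====
theorem get_alphabetic_substring_spec : Claim_equal_get_alphabetic_substring := by
  intro string _
  unfold Spec_get_alphabetic_substring
  rcases eq_or_ne string.toList [] with h | h
  · unfold get_alphabetic_substring get_alphabetic_substring_alt
    rw [h]
    simp [PySem.List.pyRange_neg_one_eq_nil, pvAGo, pvDigitIdxs, PySem.List.enumerate_nil]
  · have halt := pvAlt_eq string.toList h
    rw [String.ofList_toList] at halt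
    rw [halt]
    unfold get_alphabetic_substring
    have hcast : ((string.toList.length : Int) - 1) = ((string.toList.length - 1 : Nat) : Int) := by
      have := List.length_pos_of_ne_nil h
      omega
    rw [hcast, pvAGo_range string.toList (string.toList.length - 1)
      (by have := List.length_pos_of_ne_nil h; omega)]
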